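-- pv_equiv track=rewrite | github.com/Akrielz/diffusion_structure_inpaint | bin/structure_utils.py | _replace_monotonic
-- ===== SOURCE A (Python) =====
-- from typing import Optional, List, Dict, Any
--
-- def _replace_monotonic(arr: List[int]) -> List[int]:
--     """
--     Replace the missing values in the array with consecutive numbers.
--
--     Parameters
--     ----------
--     arr : list[int]
--         The array of residues id.
--
--     Returns
--     -------
--     arr : list[int]
--         The array of residues id with the missing values replaced with consecutive numbers.
--     """
--
--     # Find the first non-negative value in the array
--     i = 0
--     while i < len(arr) and arr[i] == -1:
--         i += 1
--
--     # If the first value is -1, backfill with consecutive integers starting from i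
--     if i > 0:
--         for j in range(i-1, -1, -1):
--             arr[j] = arr[j + 1] - 1
--
--     prev = arr[i]
--     # Iterate over array starting from the first non-negative value
--     for j in range(i+1, len(arr)):
--         # If the element is -1, replace with consecutive integer
--         if arr[j] == -1:
--             arr[j] = prev + 1
--
--             # Ensure that the array stays monotonic
--             if arr[j] <= arr[j-1]:
--                 arr[j] = arr[j-1] + 1
--
--             # Update variables
--             prev = arr[j]
--
--         # If the element is not -1, update variables
--         else:
--             prev = arr[j]
--
--     # Return modified array
--     return arr
-- ===== SOURCE B (Python) =====
-- from typing import List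
--
-- def _replace_monotonic(arr: List[int]) -> List[int]:
--     # Single forward pass: seed prev so that prev+1 chaining reproduces the
--     # backward leading fill; mutates arr in place and returns it, and raises
--     # IndexError on empty/all--1 input exactly like the original.
--     i = 0
--     while arr[i] == -1:
--         i += 1
--     prev = arr[i] - i - 1
--     for j in range(len(arr)):
--         if arr[j] == -1:
--             arr[j] = prev + 1
--         prev = arr[j]
--     return arr
-- ===== Notes on version B (the rewrite author's own statement) =====
-- stated objective: simpler
-- what changed: B replaces A's three phases (forward scan for the first non-(-1), backward leading-fill loop, forward fill loop with a dead monotonic-adjustment branch) by a single forward pass whose prev accumulator is seeded with arr[i] - i - 1 so the prev+1 chaining reproduces the backward fill.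
import Mathlib
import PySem

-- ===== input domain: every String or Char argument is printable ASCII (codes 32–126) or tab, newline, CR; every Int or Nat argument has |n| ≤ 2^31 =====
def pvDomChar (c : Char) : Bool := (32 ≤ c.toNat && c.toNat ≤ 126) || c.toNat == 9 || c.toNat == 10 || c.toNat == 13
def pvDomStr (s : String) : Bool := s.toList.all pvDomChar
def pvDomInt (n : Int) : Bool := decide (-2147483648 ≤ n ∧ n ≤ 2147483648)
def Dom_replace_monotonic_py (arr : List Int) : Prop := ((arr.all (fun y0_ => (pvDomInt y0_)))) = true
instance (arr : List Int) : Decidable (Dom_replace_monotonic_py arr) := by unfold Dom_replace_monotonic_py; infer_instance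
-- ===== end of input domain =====

-- B merges A's backward leading-fill loop and forward loop into one pass with a
-- precomputed seed and drops A's dead monotonic-adjustment branch (objective: simpler).
-- Both A and B mutate arr in place in Python and return it; the equivalence proved here
-- is about the returned value (B performs the same in-place mutation as A).


-- ===== PORT A =====
-- while i < len(arr) and arr[i] == -1: i += 1
def whileIdxA (arr : List Int) (i : Nat) : Nat :=
  if _h : i < arr.length then
    if arr.getD i 0 = -1 then whileIdxA arr (i + 1) else i
  else i
termination_by arr.length - i

-- for j in range(i-1, -1, -1): arr[j] = arr[j+1] - 1   (argument counts remaining iterations)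
def backLoopA (arr : List Int) : Nat → List Int
  | 0 => arr
  | k + 1 => backLoopA (arr.set k (arr.getD (k + 1) 0 - 1)) k

-- for j in range(i+1, len(arr)): …  (the monotonic-adjustment branch kept literally, inlined)
def fwdLoopA (arr : List Int) (prev : Int) (j : Nat) : List Int :=
  if _h : j < arr.length then
    if arr.getD j 0 = -1 then
      -- arr[j] = prev + 1; if arr[j] <= arr[j-1]: arr[j] = arr[j-1] + 1; prev = arr[j]
      if (arr.set j (prev + 1)).getD j 0 ≤ (arr.set j (prev + 1)).getD (j - 1) 0 then
        fwdLoopA ((arr.set j (prev + 1)).set j ((arr.set j (prev + 1)).getD (j - 1) 0 + 1))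
          (((arr.set j (prev + 1)).set j ((arr.set j (prev + 1)).getD (j - 1) 0 + 1)).getD j 0)
          (j + 1)
      else
        fwdLoopA (arr.set j (prev + 1)) ((arr.set j (prev + 1)).getD j 0) (j + 1)
    else
      fwdLoopA arr (arr.getD j 0) (j + 1)
  else arr
termination_by arr.length - j
decreasing_by all_goals ((try simp); omega)

def replace_monotonic_py (arr : List Int) : List Int :=
  let i := whileIdxA arr 0
  let arr1 := if i > 0 then backLoopA arr i else arr
  let prev := arr1.getD i 0
  fwdLoopA arr1 prev (i + 1)

-- ===== PORT B =====
-- while arr[i] == -1: i += 1  (the bound test is only a totality guard; Python B raises outside Pre_)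
def findIdxB (arr : List Int) (i : Nat) : Nat :=
  if _h : i < arr.length then
    if arr.getD i 0 = -1 then findIdxB arr (i + 1) else i
  else i
termination_by arr.length - i

-- the single forward pass: prev accumulator, prev + 1 where the element is -1
def fillB (prev : Int) : List Int → List Int
  | [] => []
  | x :: xs =>
    (if x = -1 then prev + 1 else x) :: fillB (if x = -1 then prev + 1 else x) xs

def replace_monotonic_py_alt (arr : List Int) : List Int :=
  let i := findIdxB arr 0
  let prev := arr.getD i 0 - i - 1
  fillB prev arr

-- ===== PRECONDITION & SPEC =====
-- Pre_ excludes exactly the inputs on which Python A raises IndexError (empty or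
-- all-(-1) arrays); Python B raises IndexError there too.
def Pre_replace_monotonic_py (arr : List Int) : Prop := ∃ x ∈ arr, x ≠ -1
instance (arr : List Int) : Decidable (Pre_replace_monotonic_py arr) := by
  unfold Pre_replace_monotonic_py; infer_instance

def pvWitness_replace_monotonic_py : List Int := [-1, 4, -1, -1, 9]

def Spec_replace_monotonic_py (arr : List Int) (out : List Int) : Prop := out = replace_monotonic_py_alt arr
instance (arr : List Int) (out : List Int) : Decidable (Spec_replace_monotonic_py arr out) := by unfold Spec_replace_monotonic_py; infer_instance

-- ===== CLAIM (what is proved, stated in full; the proofs are below) =====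
def Claim_equal_replace_monotonic_py : Prop := ∀ (arr : List Int), Dom_replace_monotonic_py arr → Pre_replace_monotonic_py arr → Spec_replace_monotonic_py arr (replace_monotonic_py arr)

-- ===== LEMMAS AND PROOFS =====

-- leading (-1)-count of a list
def cntM1 (l : List Int) : Nat := (l.takeWhile (fun x => x == -1)).length

-- [v - n, v - n + 1, ..., v - 1]
def preSeq (v : Int) : Nat → List Int
  | 0 => []
  | n + 1 => (v - (n + 1 : Nat)) :: preSeq v n

theorem preSeq_length (v : Int) (n : Nat) : (preSeq v n).length = n := by
  induction n with
  | zero => rfl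
  | succ n ih => simp [preSeq, ih]

theorem preSeq_succ' (v : Int) (n : Nat) :
    preSeq v (n + 1) = preSeq (v - 1) n ++ [v - 1] := by
  induction n generalizing v with
  | zero => simp [preSeq]
  | succ n ih =>
    rw [preSeq, ih, preSeq]
    have h1 : v - ((n : Int) + 1 + 1) = v - 1 - ((n : Int) + 1) := by ring
    push_cast
    rw [h1]
    simp [preSeq]

theorem whileIdxA_cnt_aux (n : Nat) : ∀ (arr : List Int) (i : Nat), arr.length ≤ i + n →
    whileIdxA arr i = i + cntM1 (arr.drop i) := by
  induction n with
  | zero =>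
    intro arr i hn
    rw [whileIdxA, dif_neg (by omega), List.drop_eq_nil_of_le (by omega)]
    simp [cntM1]
  | succ n ih =>
    intro arr i hn
    by_cases h : i < arr.length
    · have hd := List.drop_eq_getElem_cons h
      rw [whileIdxA]
      by_cases hv : arr.getD i 0 = -1
      · have hg : arr[i] = -1 := by
          simpa [List.getD_eq_getElem?_getD, List.getElem?_eq_getElem h] using hv
        rw [hg] at hd
        rw [dif_pos h, if_pos hv, ih arr (i + 1) (by omega), hd]
        have hcnt : cntM1 ((-1) :: arr.drop (i + 1)) = cntM1 (arr.drop (i + 1)) + 1 := by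
          simp [cntM1]
        rw [hcnt]
        omega
      · have hg : (arr[i] == (-1 : Int)) = false := by
          simpa [List.getD_eq_getElem?_getD, List.getElem?_eq_getElem h] using hv
        rw [dif_pos h, if_neg hv, hd]
        have hcnt : cntM1 (arr[i] :: arr.drop (i + 1)) = 0 := by
          simp [cntM1, List.takeWhile_cons, hg]
        rw [hcnt]
        omega
    · rw [whileIdxA, dif_neg h, List.drop_eq_nil_of_le (by omega)]
      simp [cntM1]

theorem whileIdxA_zero (arr : List Int) : whileIdxA arr 0 = cntM1 arr := by
  simpa using whileIdxA_cnt_aux arr.length arr 0 (by omega)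

theorem findIdxB_cnt_aux (n : Nat) : ∀ (arr : List Int) (i : Nat), arr.length ≤ i + n →
    findIdxB arr i = i + cntM1 (arr.drop i) := by
  induction n with
  | zero =>
    intro arr i hn
    rw [findIdxB, dif_neg (by omega), List.drop_eq_nil_of_le (by omega)]
    simp [cntM1]
  | succ n ih =>
    intro arr i hn
    by_cases h : i < arr.length
    · have hd := List.drop_eq_getElem_cons h
      rw [findIdxB]
      by_cases hv : arr.getD i 0 = -1
      · have hg : arr[i] = -1 := by
          simpa [List.getD_eq_getElem?_getD, List.getElem?_eq_getElem h] using hv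
        rw [hg] at hd
        rw [dif_pos h, if_pos hv, ih arr (i + 1) (by omega), hd]
        have hcnt : cntM1 ((-1) :: arr.drop (i + 1)) = cntM1 (arr.drop (i + 1)) + 1 := by
          simp [cntM1]
        rw [hcnt]
        omega
      · have hg : (arr[i] == (-1 : Int)) = false := by
          simpa [List.getD_eq_getElem?_getD, List.getElem?_eq_getElem h] using hv
        rw [dif_pos h, if_neg hv, hd]
        have hcnt : cntM1 (arr[i] :: arr.drop (i + 1)) = 0 := by
          simp [cntM1, List.takeWhile_cons, hg]
        rw [hcnt]
        omega
    · rw [findIdxB, dif_neg h, List.drop_eq_nil_of_le (by omega)]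
      simp [cntM1]

theorem findIdxB_zero (arr : List Int) : findIdxB arr 0 = cntM1 arr := by
  simpa using findIdxB_cnt_aux arr.length arr 0 (by omega)

theorem decomp_of_pre (arr : List Int) (h : ∃ x ∈ arr, x ≠ -1) :
    ∃ i v rest, arr = List.replicate i (-1) ++ v :: rest ∧ v ≠ -1 := by
  induction arr with
  | nil => simp at h
  | cons x xs ih =>
    by_cases hx : x = -1
    · subst hx
      have h' : ∃ y ∈ xs, y ≠ -1 := by simpa using h
      obtain ⟨i, v, rest, he, hv⟩ := ih h'
      exact ⟨i + 1, v, rest, by simp [List.replicate_succ, he], hv⟩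
    · exact ⟨0, x, xs, by simp, hx⟩

theorem cntM1_repl (i : Nat) (v : Int) (rest : List Int) (hv : v ≠ -1) :
    cntM1 (List.replicate i (-1) ++ v :: rest) = i := by
  induction i with
  | zero => simp [cntM1, List.takeWhile_cons, hv]
  | succ n ih => simpa [cntM1, List.replicate_succ, List.takeWhile_cons] using ih

theorem backLoopA_repl (i : Nat) (v : Int) (rest : List Int) :
    backLoopA (List.replicate i (-1) ++ v :: rest) i = preSeq v i ++ v :: rest := by
  induction i generalizing v rest with
  | zero => simp [backLoopA, preSeq]
  | succ n ih =>
    rw [backLoopA]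
    have harr : List.replicate (n + 1) (-1 : Int) ++ v :: rest
        = List.replicate n (-1) ++ (-1 : Int) :: v :: rest := by
      rw [List.replicate_succ']; simp
    have hlen : (List.replicate n (-1 : Int)).length = n := by simp
    have hget : (List.replicate (n + 1) (-1 : Int) ++ v :: rest).getD (n + 1) 0 = v := by
      rw [harr]
      simp [List.getD_append_right, hlen]
    have hset : (List.replicate (n + 1) (-1 : Int) ++ v :: rest).set n (v - 1)
        = List.replicate n (-1) ++ (v - 1) :: v :: rest := by
      rw [harr, List.set_append]
      simp [hlen]
    rw [hget, hset, ih (v - 1) (v :: rest), preSeq_succ', List.append_assoc, List.singleton_append]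

theorem fillB_repl (i : Nat) (v : Int) (xs : List Int) :
    fillB (v - i - 1) (List.replicate i (-1) ++ xs) = preSeq v i ++ fillB (v - 1) xs := by
  induction i with
  | zero => simp [preSeq]
  | succ n ih =>
    rw [List.replicate_succ, List.cons_append, fillB,
      if_pos (show (-1 : Int) = -1 from rfl)]
    have h1 : v - ((n + 1 : Nat) : Int) - 1 + 1 = v - (n : Int) - 1 := by push_cast; ring
    have h2 : v - ((n + 1 : Nat) : Int) = v - (n : Int) - 1 := by push_cast; ring
    rw [h1, ih, preSeq, h2, List.cons_append]

theorem fwdLoopA_eq_fillB (n : Nat) : ∀ (arr : List Int) (prev : Int) (j : Nat),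
    arr.length ≤ j + n → 1 ≤ j → prev = arr.getD (j - 1) 0 →
    fwdLoopA arr prev j = arr.take j ++ fillB prev (arr.drop j) := by
  induction n with
  | zero =>
    intro arr prev j hn hj hp
    rw [fwdLoopA, dif_neg (by omega), List.drop_eq_nil_of_le (by omega),
      List.take_of_length_le (by omega)]
    simp [fillB]
  | succ n ih =>
    intro arr prev j hn hj hp
    by_cases h : j < arr.length
    · have hd := List.drop_eq_getElem_cons h
      by_cases hv : arr.getD j 0 = -1
      · have hg : arr[j] = -1 := by
          simpa [List.getD_eq_getElem?_getD, List.getElem?_eq_getElem h] using hv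
        have e1 : (arr.set j (prev + 1)).getD j 0 = prev + 1 := by
          simp [List.getD_eq_getElem?_getD, List.getElem?_set_self h]
        have e2 : (arr.set j (prev + 1)).getD (j - 1) 0 = prev := by
          rw [hp]
          simp [List.getD_eq_getElem?_getD, List.getElem?_set_ne (by omega : j ≠ j - 1)]
        rw [fwdLoopA, dif_pos h, if_pos hv, e1, e2, if_neg (by omega : ¬ prev + 1 ≤ prev)]
        rw [ih (arr.set j (prev + 1)) (prev + 1) (j + 1) (by simp; omega) (by omega)
          (by rw [show j + 1 - 1 = j from rfl, e1])]
        have hA1 : arr.set j (prev + 1) = arr.take j ++ (prev + 1) :: arr.drop (j + 1) := by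
          rw [List.set_eq_take_append_cons_drop, if_pos h]
        have hlt : (arr.take j).length = j := by simp; omega
        have hs1 : (arr.take j ++ (prev + 1) :: arr.drop (j + 1)).take (j + 1)
            = arr.take j ++ [prev + 1] := by
          rw [List.take_append, hlt, show j + 1 - j = 1 from by omega,
            List.take_of_length_le (by rw [hlt]; omega)]
          rfl
        have hs2 : (arr.take j ++ (prev + 1) :: arr.drop (j + 1)).drop (j + 1)
            = arr.drop (j + 1) := by
          rw [List.drop_append, hlt, show j + 1 - j = 1 from by omega,
            List.drop_eq_nil_of_le (by rw [hlt]; omega)]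
          rfl
        rw [hA1, hs1, hs2]
        rw [hg] at hd
        rw [hd]
        have hf : fillB prev ((-1) :: arr.drop (j + 1))
            = (prev + 1) :: fillB (prev + 1) (arr.drop (j + 1)) := by
          simp [fillB]
        rw [hf, List.append_assoc, List.singleton_append]
      · have hg : ¬ arr[j] = -1 := by
          simpa [List.getD_eq_getElem?_getD, List.getElem?_eq_getElem h] using hv
        have e3 : arr.getD j 0 = arr[j] := by
          simp [List.getD_eq_getElem?_getD, List.getElem?_eq_getElem h]
        rw [fwdLoopA, dif_pos h, if_neg hv]
        rw [ih arr (arr.getD j 0) (j + 1) (by omega) (by omega) rfl]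
        have htk : arr.take (j + 1) = arr.take j ++ [arr[j]] := by
          rw [List.take_add_one, List.getElem?_eq_getElem h]
          rfl
        rw [hd, e3]
        have hf : fillB prev (arr[j] :: arr.drop (j + 1))
            = arr[j] :: fillB arr[j] (arr.drop (j + 1)) := by
          simp [fillB, hg]
        rw [hf, htk, List.append_assoc, List.singleton_append]
    · rw [fwdLoopA, dif_neg h, List.drop_eq_nil_of_le (by omega),
        List.take_of_length_le (by omega)]
      simp [fillB]

-- ===== VERDICT (by name: the statement is the Claim_ definition above) =====
theorem replace_monotonic_py_spec : Claim_equal_replace_monotonic_py := by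
  intro arr _ hpre
  obtain ⟨i, v, rest, he, hv⟩ := decomp_of_pre arr hpre
  subst he
  show replace_monotonic_py _ = replace_monotonic_py_alt _
  have hc : cntM1 (List.replicate i (-1) ++ v :: rest) = i := cntM1_repl i v rest hv
  have hiA : whileIdxA (List.replicate i (-1) ++ v :: rest) 0 = i := by
    rw [whileIdxA_zero, hc]
  have hiB : findIdxB (List.replicate i (-1) ++ v :: rest) 0 = i := by
    rw [findIdxB_zero, hc]
  have hrl : (List.replicate i (-1 : Int)).length = i := by simp
  have hgetv : (List.replicate i (-1 : Int) ++ v :: rest).getD i 0 = v := by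
    rw [List.getD_append_right _ _ _ _ (by omega), hrl]
    simp
  have hpl : (preSeq v i).length = i := preSeq_length v i
  simp only [replace_monotonic_py, replace_monotonic_py_alt, hiA, hiB, hgetv]
  have harr1 : (if i > 0 then backLoopA (List.replicate i (-1) ++ v :: rest) i
      else List.replicate i (-1) ++ v :: rest) = preSeq v i ++ v :: rest := by
    split
    · exact backLoopA_repl i v rest
    · have hi0 : i = 0 := by omega
      subst hi0
      simp [preSeq]
  rw [harr1]
  have hprev : (preSeq v i ++ v :: rest).getD i 0 = v := by
    rw [List.getD_append_right _ _ _ _ (by omega), hpl]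
    simp
  rw [hprev]
  rw [fwdLoopA_eq_fillB ((preSeq v i ++ v :: rest).length) (preSeq v i ++ v :: rest) v (i + 1)
    (by omega) (by omega) (by rw [show i + 1 - 1 = i from rfl, hprev])]
  have htake : (preSeq v i ++ v :: rest).take (i + 1) = preSeq v i ++ [v] := by
    rw [List.take_append, hpl, show i + 1 - i = 1 from by omega,
      List.take_of_length_le (by rw [hpl]; omega)]
    rfl
  have hdrop : (preSeq v i ++ v :: rest).drop (i + 1) = rest := by
    rw [List.drop_append, hpl, show i + 1 - i = 1 from by omega,
      List.drop_eq_nil_of_le (by rw [hpl]; omega)]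
    rfl
  rw [htake, hdrop, fillB_repl i v (v :: rest)]
  simp [fillB, hv, List.append_assoc]
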